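-- pv_equiv track=rewrite | github.com/damunza/binary-text | fun.py | chartotext
-- ===== SOURCE A (Python) =====
-- def chartotext(x):
--     '''
--     a function that converts the processe characters into text codes
--     '''
--     letters = []
--     for element in x:
--         # this separates the individual character values intro single digits
--         val = 0
--         h = 0
--         for one in element:
--             val += int(one) * (2**h)
--             h += 1
--         letters.append(val)
--     return letters
-- ===== SOURCE B (Python) =====
-- def chartotext(x):
--     '''
--     a function that converts the processe characters into text codes
--     '''
--     letters = []
--     for element in x:
--         # Horner's method over the bits MSB-first (reversed order)
--         val = 0
--         for one in reversed(element):
--             val = val * 2 + int(one)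
--         letters.append(val)
--     return letters
-- ===== Notes on version B (the rewrite author's own statement) =====
-- stated objective: idiomatic
-- what changed: Replaces the exponent-tracking power sum (val += int(one)*2**h, LSB-first) by Horner's method over the reversed element (val = val*2 + int(one)), dropping the explicit exponent variable.
import Mathlib
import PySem

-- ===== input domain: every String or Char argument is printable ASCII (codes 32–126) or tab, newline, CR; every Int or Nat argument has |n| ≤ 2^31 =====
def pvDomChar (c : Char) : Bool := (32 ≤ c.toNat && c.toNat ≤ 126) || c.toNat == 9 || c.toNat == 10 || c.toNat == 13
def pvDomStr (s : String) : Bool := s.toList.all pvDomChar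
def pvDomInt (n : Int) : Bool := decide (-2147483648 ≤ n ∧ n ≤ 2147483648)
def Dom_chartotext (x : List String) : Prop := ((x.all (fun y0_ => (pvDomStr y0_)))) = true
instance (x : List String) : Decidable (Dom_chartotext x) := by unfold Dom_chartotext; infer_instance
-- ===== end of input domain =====

-- B replaces A's exponent-tracking power sum by Horner's method over the reversed
-- digits (val = val*2 + int(one)); objective: more idiomatic, same cost.

-- ===== PORT A =====
-- int(one) for a single digit character (Pre_ guarantees '0'..'9')
def pvDigit (c : Char) : Int := (c.toNat : Int) - 48

def chartotext (x : List String) : List Int :=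
  x.map (fun element =>
    (element.toList.foldl
      (fun (p : Int × Nat) one => (p.1 + pvDigit one * 2 ^ p.2, p.2 + 1))
      (0, 0)).1)

-- ===== PORT B =====
def chartotext_alt (x : List String) : List Int :=
  x.map (fun element =>
    element.toList.reverse.foldl (fun val one => val * 2 + pvDigit one) 0)

-- ===== PRECONDITION & SPEC =====
-- Pre_ excludes inputs with an element containing a non-digit character (code outside 48-57),
-- on which Python's int(one) raises ValueError in both A and B.
def Pre_chartotext (x : List String) : Prop :=
  (x.all (fun s => s.toList.all (fun c => decide (47 < c.toNat) && decide (c.toNat < 58)))) = true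
instance (x : List String) : Decidable (Pre_chartotext x) := by unfold Pre_chartotext; infer_instance
def pvWitness_chartotext : List String := ["5303", "63"]

def Spec_chartotext (x : List String) (out : List Int) : Prop := out = chartotext_alt x
instance (x : List String) (out : List Int) : Decidable (Spec_chartotext x out) := by unfold Spec_chartotext; infer_instance

-- ===== CLAIM (what is proved, stated in full; the proofs are below) =====
def Claim_equal_chartotext : Prop := ∀ (x : List String), Dom_chartotext x → Pre_chartotext x → Spec_chartotext x (chartotext x)

-- ===== LEMMAS AND PROOFS =====

-- B's Horner value of a digit list
def pvHorner (cs : List Char) : Int :=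
  cs.reverse.foldl (fun val one => val * 2 + pvDigit one) 0

theorem pvHorner_cons (c : Char) (cs : List Char) :
    pvHorner (c :: cs) = pvDigit c + 2 * pvHorner cs := by
  simp [pvHorner, List.foldl_append]
  ring

theorem pvFoldA_eq (cs : List Char) : ∀ (v : Int) (h : Nat),
    (cs.foldl (fun (p : Int × Nat) one => (p.1 + pvDigit one * 2 ^ p.2, p.2 + 1)) (v, h)).1
      = v + 2 ^ h * pvHorner cs := by
  induction cs with
  | nil => intro v h; simp [pvHorner]
  | cons c cs ih =>
      intro v h
      simp only [List.foldl_cons, ih, pvHorner_cons, pow_succ]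
      ring

-- ===== VERDICT (by name: the statement is the Claim_ definition above) =====
theorem chartotext_spec : Claim_equal_chartotext := by
  intro x _ _
  unfold Spec_chartotext chartotext chartotext_alt
  refine List.map_congr_left (fun s _ => ?_)
  rw [pvFoldA_eq]
  simp [pvHorner]
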